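-- pv_equiv track=rewrite | github.com/philipperemy/information-extraction-with-dominating-rules | logic.py | filter_weird_entities
-- ===== SOURCE A (Python) =====
-- def filter_weird_entities(entity_relations, known_entities):
--     # could be improved
--     weird_entities = ['current']
--     relations_to_discard = []
--     for i, rel in enumerate(entity_relations):
--         for weird_entity in weird_entities:
--             if weird_entity == rel[0].lower():
--                 relations_to_discard.append(i)
--
--     # discard them here.
--     new_entity_relations = []
--     for i, rel in enumerate(entity_relations):
--         if i not in relations_to_discard:
--             new_entity_relations.append(rel)
--     return new_entity_relations, len(relations_to_discard)
-- ===== SOURCE B (Python) =====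
-- def filter_weird_entities(entity_relations, known_entities):
--     new_entity_relations = []
--     discarded = 0
--     for rel in entity_relations:
--         if rel[0].lower() == 'current':
--             discarded += 1
--         else:
--             new_entity_relations.append(rel)
--     return new_entity_relations, discarded
-- ===== Notes on version B (the rewrite author's own statement) =====
-- stated objective: simpler
-- what changed: Replaces A's two passes (build an index list of weird rows, then re-scan with an 'i not in list' membership test) by one pass that appends keepers and counts discards directly.
import Mathlib
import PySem

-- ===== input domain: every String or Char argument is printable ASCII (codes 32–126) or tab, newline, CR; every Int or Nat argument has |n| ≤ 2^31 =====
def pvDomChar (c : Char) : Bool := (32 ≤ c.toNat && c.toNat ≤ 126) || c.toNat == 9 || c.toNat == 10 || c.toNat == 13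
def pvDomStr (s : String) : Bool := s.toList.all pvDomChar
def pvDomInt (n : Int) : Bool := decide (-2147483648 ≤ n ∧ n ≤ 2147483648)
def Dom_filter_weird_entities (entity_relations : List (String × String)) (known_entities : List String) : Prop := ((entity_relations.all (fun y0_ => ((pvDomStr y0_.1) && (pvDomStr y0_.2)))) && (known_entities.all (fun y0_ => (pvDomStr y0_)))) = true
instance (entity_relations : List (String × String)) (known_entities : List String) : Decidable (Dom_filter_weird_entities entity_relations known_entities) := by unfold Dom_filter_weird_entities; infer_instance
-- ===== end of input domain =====

-- B replaces A's two passes (index-list of weird rows, then re-scan with an `i not in list` test) by one pass that appends keepers and counts discards; objective: simpler (same asymptotic cost).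


-- ===== PORT A =====
def filter_weird_entities (entity_relations : List (String × String)) (known_entities : List String) : (List (String × String)) × Int :=
  let weird_entities : List String := ["current"]
  let relations_to_discard : List Int :=
    (PySem.List.enumerate entity_relations).foldl
      (fun acc p =>
        weird_entities.foldl
          (fun acc2 weird_entity =>
            if weird_entity == PySem.Str.lower p.2.1 then acc2 ++ [p.1] else acc2)
          acc)
      []
  let new_entity_relations : List (String × String) :=
    (PySem.List.enumerate entity_relations).foldl
      (fun acc p => if relations_to_discard.contains p.1 then acc else acc ++ [p.2])
      []
  (new_entity_relations, (relations_to_discard.length : Int))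

-- ===== PORT B =====
-- one pass: keep the relation or bump the discard counter
def filter_weird_entities_alt (entity_relations : List (String × String)) (known_entities : List String) : (List (String × String)) × Int :=
  entity_relations.foldl
    (fun (st : List (String × String) × Int) rel =>
      if PySem.Str.lower rel.1 == "current" then (st.1, st.2 + 1) else (st.1 ++ [rel], st.2))
    ([], 0)

-- ===== PRECONDITION & SPEC =====
def Spec_filter_weird_entities (entity_relations : List (String × String)) (known_entities : List String) (out : (List (String × String)) × Int) : Prop := out = filter_weird_entities_alt entity_relations known_entities
instance (entity_relations : List (String × String)) (known_entities : List String) (out : (List (String × String)) × Int) : Decidable (Spec_filter_weird_entities entity_relations known_entities out) := by unfold Spec_filter_weird_entities; infer_instance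

-- ===== CLAIM (what is proved, stated in full; the proofs are below) =====
def Claim_equal_filter_weird_entities : Prop := ∀ (entity_relations : List (String × String)) (known_entities : List String), Dom_filter_weird_entities entity_relations known_entities → Spec_filter_weird_entities entity_relations known_entities (filter_weird_entities entity_relations known_entities)

-- ===== LEMMAS AND PROOFS =====

-- B's loop invariant: the fold accumulates kept relations and the discard count.
lemma alt_foldl_spec (xs : List (String × String)) (l : List (String × String)) (c : Int) :
    xs.foldl
      (fun (st : List (String × String) × Int) rel =>
        if PySem.Str.lower rel.1 == "current" then (st.1, st.2 + 1) else (st.1 ++ [rel], st.2))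
      (l, c)
    = (l ++ xs.filter (fun rel => !(PySem.Str.lower rel.1 == "current")),
       c + (xs.countP (fun rel => PySem.Str.lower rel.1 == "current") : Int)) := by
  induction xs generalizing l c with
  | nil => simp
  | cons x xs ih =>
    rw [List.foldl_cons, List.filter_cons, List.countP_cons]
    by_cases h : (PySem.Str.lower x.1 == "current") = true
    · rw [if_pos h, ih]
      simp only [h, Bool.not_true, if_pos]
      refine Prod.ext rfl ?_
      push_cast; ring
    · rw [if_neg h, ih]
      simp only [Bool.not_eq_true] at h
      simp [h]

-- membership in A's discard-index list is exactly the weirdness of the row at that index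
lemma contains_discard (xs : List (String × String)) (k : Nat) (hk : k < xs.length) :
    ((((PySem.List.enumerate xs 0).filter
        (fun p => ("current" == PySem.Str.lower p.2.1 : Bool))).map (·.1)).contains ((0 : Int) + (k : Nat)))
      = ("current" == PySem.Str.lower xs[k].1) := by
  rw [Bool.eq_iff_iff, List.contains_iff_mem]
  simp only [List.mem_map, List.mem_filter, PySem.List.mem_enumerate_iff]
  constructor
  · rintro ⟨p, ⟨⟨k', hk', rfl⟩, hq⟩, hfst⟩
    have hkk : k' = k := by
      have : (0 : Int) + (k' : Nat) = (0 : Int) + (k : Nat) := hfst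
      omega
    subst hkk
    exact hq
  · intro hq
    exact ⟨((0 : Int) + (k : Nat), xs[k]), ⟨⟨k, hk, rfl⟩, hq⟩, rfl⟩

-- A's second pass over a suffix starting at offset s, given a membership oracle for D
lemma pass2_spec (ys : List (String × String)) (s : Int) (acc : List (String × String)) (D : List Int)
    (hD : ∀ (k : Nat) (hk : k < ys.length), D.contains (s + (k : Nat)) = ("current" == PySem.Str.lower (ys[k]'hk).1)) :
    (PySem.List.enumerate ys s).foldl
      (fun acc p => if D.contains p.1 then acc else acc ++ [p.2]) acc
    = acc ++ ys.filter (fun rel => !("current" == PySem.Str.lower rel.1 : Bool)) := by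
  induction ys generalizing s acc with
  | nil => simp [PySem.List.enumerate_nil]
  | cons x ys ih =>
    rw [PySem.List.enumerate_cons, List.foldl_cons, List.filter_cons]
    have h0 : D.contains s = ("current" == PySem.Str.lower x.1) := by
      have := hD 0 (by simp)
      simpa using this
    have hstep : ∀ (k : Nat) (hk : k < ys.length),
        D.contains ((s + 1) + (k : Nat)) = ("current" == PySem.Str.lower (ys[k]'hk).1) := by
      intro k hk
      have h := hD (k + 1) (by simp; omega)
      have hidx : s + ((k + 1 : Nat) : Int) = (s + 1) + (k : Nat) := by push_cast; ring
      rw [hidx] at h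
      simpa using h
    by_cases h : ("current" == PySem.Str.lower x.1) = true
    · rw [h0, if_pos h, ih (s + 1) acc hstep]
      simp [h]
    · rw [h0, if_neg h, ih (s + 1) (acc ++ [x]) hstep]
      simp only [Bool.not_eq_true] at h
      simp [h]

-- filtering enumerate by a predicate on the element, then projecting, is filtering the list
lemma filter_enum_snd {α : Type} (xs : List α) (s : Int) (r : α → Bool) :
    (((PySem.List.enumerate xs s).filter (fun p => r p.2)).map (·.2)) = xs.filter r := by
  induction xs generalizing s with
  | nil => simp [PySem.List.enumerate_nil]
  | cons x xs ih =>
    by_cases h : r x <;>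
      simp [PySem.List.enumerate_cons, h, ih]

-- both components of A's result, for any discard list D equal to the first pass's value
lemma master (xs : List (String × String)) (D : List Int)
    (h1 : D = ((PySem.List.enumerate xs 0).filter
        (fun p => ("current" == PySem.Str.lower p.2.1 : Bool))).map (·.1)) :
    ((PySem.List.enumerate xs 0).foldl
        (fun acc p => if D.contains p.1 then acc else acc ++ [p.2]) ([] : List (String × String)),
      (D.length : Int))
    = (xs.filter (fun rel => !(PySem.Str.lower rel.1 == "current")),
       (xs.countP (fun rel => PySem.Str.lower rel.1 == "current") : Int)) := by
  have hD : ∀ (k : Nat) (hk : k < xs.length),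
      D.contains ((0 : Int) + (k : Nat)) = ("current" == PySem.Str.lower (xs[k]'hk).1) := by
    intro k hk
    rw [h1]
    exact contains_discard xs k hk
  refine Prod.ext ?_ ?_
  · rw [pass2_spec xs 0 [] D hD, List.nil_append]
    apply List.filter_congr
    intro rel _
    simp [Bool.beq_comm]
  · have h2 := filter_enum_snd xs 0 (fun rel => ("current" == PySem.Str.lower rel.1 : Bool))
    have hlen : D.length = (xs.filter (fun rel => ("current" == PySem.Str.lower rel.1 : Bool))).length := by
      rw [h1, List.length_map, ← h2, List.length_map]
    have hcnt := List.countP_congr (l := xs)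
      (p := fun rel => ("current" == PySem.Str.lower rel.1 : Bool))
      (q := fun rel => (PySem.Str.lower rel.1 == "current" : Bool))
      (by intro rel _; simp [Bool.beq_comm])
    rw [hlen, ← hcnt, List.countP_eq_length_filter]

-- ===== VERDICT (by name: the statement is the Claim_ definition above) =====
theorem filter_weird_entities_spec : Claim_equal_filter_weird_entities := by
  intro xs ks _
  unfold Spec_filter_weird_entities filter_weird_entities filter_weird_entities_alt
  rw [alt_foldl_spec]
  simp only [List.foldl_cons, List.foldl_nil, List.nil_append, zero_add]
  exact master xs _ (by rw [PySem.List.foldl_append_if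
    (p := fun p : Int × (String × String) => ("current" == PySem.Str.lower p.2.1 : Bool))
    (f := fun p : Int × (String × String) => p.1)]; simp)
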